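-- pv_equiv track=rewrite | github.com/hk-bae/coding-test | programmers/17681.py | solution
-- ===== SOURCE A (Python) =====
-- def solution(n, arr1, arr2):
--     answer = []
--
--     for i in range(n) :
--         num = arr1[i]
--         binary_num = bin(num)
--         string = str(binary_num)
--         string_list = list(string[2:])
--
--         list1 = [' '] * n
--         diff = n - len(string_list)
--         for j in range(len(string_list)) :
--             if string_list[j] == "1" :
--                 list1[j+diff] = '#'
--
--         num = arr2[i]
--         binary_num = bin(num)
--         string = str(binary_num)
--         string_list = list(string[2:])
--
--         list2 = [' '] * n
--         diff = n - len(string_list)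
--         for j in range(len(string_list)) :
--             if string_list[j] == "1" :
--                 list2[j+diff] = '#'
--
--         new_string = ''
--         for j in range(n) :
--             if list1[j] == " " and list2[j] == " " :
--                 new_string += " "
--             else :
--                 new_string += "#"
--
--         answer.append(new_string)
--
--
--
--     return answer
-- ===== SOURCE B (Python) =====
-- def solution(n, arr1, arr2):
--     answer = []
--     for i in range(n):
--         v = abs(arr1[i]) | abs(arr2[i])
--         row = [" "] * n
--         for b in range(v.bit_length()):
--             if v >> b & 1:
--                 row[n - 1 - b] = "#"
--         answer.append("".join(row))
--     return answer
-- ===== Notes on version B (the rewrite author's own statement) =====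
-- stated objective: alternative
-- what changed: B replaces A's per-value bin()-string parsing into two length-n character bitmaps plus a third per-character OR loop by integer bit arithmetic: one OR of the two magnitudes per row, then each set bit b plotted once at column n-1-b.
import Mathlib
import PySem

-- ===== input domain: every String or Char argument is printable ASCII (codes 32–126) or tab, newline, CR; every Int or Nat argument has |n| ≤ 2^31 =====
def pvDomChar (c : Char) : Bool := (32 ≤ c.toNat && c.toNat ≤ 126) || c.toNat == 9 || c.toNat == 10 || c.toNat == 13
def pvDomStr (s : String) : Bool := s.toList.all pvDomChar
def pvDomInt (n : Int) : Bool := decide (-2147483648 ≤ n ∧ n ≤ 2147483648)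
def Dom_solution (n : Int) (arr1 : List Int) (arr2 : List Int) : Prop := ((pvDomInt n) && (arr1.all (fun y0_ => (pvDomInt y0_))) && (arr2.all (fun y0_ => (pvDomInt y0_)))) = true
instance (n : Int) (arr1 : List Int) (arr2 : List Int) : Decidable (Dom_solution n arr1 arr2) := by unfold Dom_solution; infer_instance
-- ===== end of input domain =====

-- B computes each row in one pass of integer bit arithmetic — OR the two magnitudes and plot
-- every set bit b onto the row at column n-1-b — instead of A's two per-value character
-- bitmaps parsed out of bin() strings plus a third per-character OR loop (objective: alternative).

-- ===== PORT A =====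
-- one per-value pass of A: bin(num), string[2:], [' '] * n, then the j-loop writing '#'
-- at index j+diff (list1[k] = '#' via PySem.List.pySetD: exact for -len ≤ k < len, which
-- holds on Pre_; range(len) / range(n) are PySem.List.pyRange)
def bitmapRow (n : Int) (num : Int) : List Char :=
  let string_list := PySem.List.slice (PySem.Int.toBinChars0b num) (some 2) none
  let diff : Int := n - string_list.length
  (PySem.List.pyRange 0 (string_list.length : Int) 1).foldl
    (fun lst j =>
      if PySem.List.pyGetD string_list j ' ' == '1' then PySem.List.pySetD lst (j + diff) '#'
      else lst)
    (PySem.List.pyRepeat [' '] n)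

def solution (n : Int) (arr1 : List Int) (arr2 : List Int) : List String :=
  (PySem.List.pyRange 0 n 1).foldl
    (fun answer i =>
      let list1 := bitmapRow n (PySem.List.pyGetD arr1 i 0)
      let list2 := bitmapRow n (PySem.List.pyGetD arr2 i 0)
      let new_string : List Char :=
        (PySem.List.pyRange 0 n 1).foldl
          (fun s j =>
            if PySem.List.pyGetD list1 j ' ' == ' ' && PySem.List.pyGetD list2 j ' ' == ' '
            then s ++ [' '] else s ++ ['#'])
          []
      answer ++ [String.ofList new_string])
    []

-- ===== PORT B =====
-- for i in range(n): v = abs(arr1[i]) | abs(arr2[i]); row = [' ']*n; for b in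
-- range(v.bit_length()): if v >> b & 1: row[n-1-b] = '#'  (row[k] = '#' via pySetD,
-- exact for -len ≤ k < len, which holds on Pre_); append ''.join(row)
def solution_alt (n : Int) (arr1 : List Int) (arr2 : List Int) : List String :=
  (PySem.List.pyRange 0 n 1).foldl
    (fun answer i =>
      let v := PySem.Int.bor |PySem.List.pyGetD arr1 i 0| |PySem.List.pyGetD arr2 i 0|
      let row :=
        (PySem.List.pyRange 0 (PySem.Int.bitLength v : Int) 1).foldl
          (fun row b =>
            if PySem.Int.band (v >>> b.toNat) 1 == 1
            then PySem.List.pySetD row (n - 1 - b) '#' else row)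
          (PySem.List.pyRepeat [' '] n)
      answer ++ [String.ofList row])
    []

-- ===== PRECONDITION & SPEC =====
-- Pre_ is exactly the set of inputs on which A returns: the first n entries exist in both
-- arrays (else IndexError at arr[i]) and every used value needs at most 2n binary digits
-- (|v| < 2^(2n); a longer bin() string makes A write at an index below -n: IndexError).
def Pre_solution (n : Int) (arr1 : List Int) (arr2 : List Int) : Prop :=
  n ≤ arr1.length ∧ n ≤ arr2.length ∧
    ∀ i < n.toNat, (arr1.getD i 0).natAbs < 2 ^ (2 * n.toNat) ∧
                   (arr2.getD i 0).natAbs < 2 ^ (2 * n.toNat)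
instance (n : Int) (arr1 : List Int) (arr2 : List Int) : Decidable (Pre_solution n arr1 arr2) := by
  unfold Pre_solution; infer_instance

def pvWitness_solution : Int × List Int × List Int := (2, [1, 2], [1, 0])

def Spec_solution (n : Int) (arr1 : List Int) (arr2 : List Int) (out : List String) : Prop :=
  out = solution_alt n arr1 arr2
instance (n : Int) (arr1 : List Int) (arr2 : List Int) (out : List String) :
    Decidable (Spec_solution n arr1 arr2 out) := by unfold Spec_solution; infer_instance

-- ===== CLAIM (what is proved, stated in full; the proofs are below) =====
def Claim_equal_solution : Prop := ∀ (n : Int) (arr1 : List Int) (arr2 : List Int),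
  Dom_solution n arr1 arr2 → Pre_solution n arr1 arr2 →
  Spec_solution n arr1 arr2 (solution n arr1 arr2)

-- ===== LEMMAS AND PROOFS =====

-- bin(m)'s digits, MSB first, as a clean recursion (proof-side mirror of Nat.toDigits 2)
def natBin (m : Nat) : List Char :=
  if _h : m < 2 then [Nat.digitChar m]
  else natBin (m / 2) ++ [Nat.digitChar (m % 2)]
decreasing_by exact Nat.div_lt_self (by omega) (by omega)

lemma toDigitsCore_eq_natBin : ∀ (f m : Nat) (acc : List Char), m < f →
    Nat.toDigitsCore 2 f m acc = natBin m ++ acc := by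
  intro f
  induction f with
  | zero => omega
  | succ f ih =>
    intro m acc hm
    rw [Nat.toDigitsCore]
    by_cases h2 : m / 2 = 0
    · have hm2 : m < 2 := by omega
      conv_rhs => rw [natBin]
      simp [h2, hm2, Nat.mod_eq_of_lt hm2]
    · have hge : ¬ m < 2 := by omega
      rw [if_neg h2, ih (m / 2) _ (by omega)]
      conv_rhs => rw [natBin, dif_neg hge]
      rw [List.append_assoc]
      rfl

lemma toDigits_two_eq_natBin (m : Nat) : Nat.toDigits 2 m = natBin m :=
  toDigitsCore_eq_natBin (m + 1) m [] (by omega) |>.trans (by simp)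

lemma size_div_two (m : Nat) (h : 1 ≤ m) : m.size = (m / 2).size + 1 := by
  have hX : m / 2 < 2 ^ (m / 2).size := Nat.size_le.mp le_rfl
  have h1 : m.size ≤ (m / 2).size + 1 := by
    rw [Nat.size_le, pow_succ]
    omega
  have h2 : (m / 2).size + 1 ≤ m.size := by
    rcases Nat.eq_zero_or_pos (m / 2) with h0 | hp
    · rw [h0, Nat.size_zero]
      exact Nat.size_pos.mpr h
    · have hb : 2 ^ ((m / 2).size - 1) ≤ m / 2 := Nat.lt_size.mp (by
        have : 0 < (m / 2).size := Nat.size_pos.mpr hp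
        omega)
      have hpow : 2 ^ ((m / 2).size - 1 + 1) ≤ 2 * (m / 2) := by
        rw [pow_succ]; omega
      have hsz : (m / 2).size - 1 + 1 = (m / 2).size := by
        have : 0 < (m / 2).size := Nat.size_pos.mpr hp
        omega
      rw [hsz] at hpow
      exact Nat.lt_size.mpr (by omega)
  omega

-- characterization: the binary digits of m ≥ 1 are its bits, MSB first
lemma natBin_eq_map (m : Nat) (h : 1 ≤ m) :
    natBin m = (List.range m.size).map
      (fun j => if m.testBit (m.size - 1 - j) then '1' else '0') := by
  induction m using Nat.strong_induction_on with
  | _ m ih =>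
    by_cases h2 : m < 2
    · have hm1 : m = 1 := by omega
      subst hm1
      rw [natBin]
      decide
    · rw [natBin, dif_neg h2]
      have hd : 1 ≤ m / 2 := by omega
      have hsz := size_div_two m (by omega)
      rw [ih (m / 2) (Nat.div_lt_self (by omega) (by omega)) hd, hsz]
      rw [List.range_succ, List.map_append]
      congr 1
      · apply List.map_congr_left
        intro j hj
        rw [List.mem_range] at hj
        have harith : (m / 2).size + 1 - 1 - j = ((m / 2).size - 1 - j) + 1 := by omega
        rw [harith, Nat.testBit_add_one]
      · simp only [List.map_cons, List.map_nil]
        have h0 : (m / 2).size + 1 - 1 - (m / 2).size = 0 := by omega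
        rw [h0]
        rcases Nat.mod_two_eq_zero_or_one m with he | ho
        · rw [Nat.testBit_zero]
          simp [he, Nat.digitChar]
        · rw [Nat.testBit_zero]
          simp [ho, Nat.digitChar]

lemma length_natBin (m : Nat) (h : 1 ≤ m) : (natBin m).length = m.size := by
  rw [natBin_eq_map m h, List.length_map, List.length_range]

lemma natBin_zero : natBin 0 = ['0'] := by
  rw [natBin]
  rfl

lemma natBin_getD (m : Nat) (h : 1 ≤ m) (j : Nat) :
    (natBin m).getD j ' ' = if j < m.size then (if m.testBit (m.size - 1 - j) then '1' else '0') else ' ' := by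
  rw [natBin_eq_map m h]
  by_cases hj : j < m.size
  · rw [if_pos hj, PySem.List.getD_map_range _ _ _ _ hj]
  · rw [if_neg hj, List.getD_eq_default]
    simp only [List.length_map, List.length_range]
    omega

-- bin(v)[2:] as a digit list: the sign slot keeps 'b' (never '1'), then |v|'s digits
def binTail (v : Int) : List Char :=
  PySem.List.slice (PySem.Int.toBinChars0b v) (some 2) none

lemma binTail_eq (v : Int) :
    binTail v = (if v < 0 then ['b'] else []) ++ natBin v.natAbs := by
  unfold binTail
  by_cases hv : v < 0
  · simp only [PySem.Int.toBinChars0b, if_pos hv]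
    rw [show PySem.List.slice ('-' :: '0' :: 'b' :: Nat.toDigits 2 v.natAbs) (some 2) none
        = 'b' :: Nat.toDigits 2 v.natAbs from PySem.List.slice_from _ (by norm_num)]
    rw [toDigits_two_eq_natBin]
    simp
  · simp only [PySem.Int.toBinChars0b, if_neg hv]
    rw [show PySem.List.slice ('0' :: 'b' :: Nat.toDigits 2 v.toNat) (some 2) none
        = Nat.toDigits 2 v.toNat from PySem.List.slice_from _ (by norm_num)]
    rw [toDigits_two_eq_natBin]
    have : v.toNat = v.natAbs := by omega
    simp [this]

lemma size_le_len_binTail (v : Int) : v.natAbs.size ≤ (binTail v).length := by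
  rw [binTail_eq]
  rcases Nat.eq_zero_or_pos v.natAbs with h0 | hp
  · simp [h0]
  · rw [List.length_append, length_natBin _ hp]
    omega

lemma dig_binTail (v : Int) (j : Nat) (hj : j < (binTail v).length) :
    ((binTail v).getD j ' ' == '1') = v.natAbs.testBit ((binTail v).length - 1 - j) := by
  rcases Nat.eq_zero_or_pos v.natAbs with h0 | hp
  · have hv0 : v = 0 := by omega
    subst hv0
    have hj0 : j = 0 := by
      rw [binTail_eq, h0, natBin_zero] at hj
      simp at hj
      omega
    subst hj0
    rw [binTail_eq]
    simp [natBin_zero]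
  · rw [binTail_eq] at hj ⊢
    by_cases hv : v < 0
    · rw [if_pos hv] at hj ⊢
      rw [List.length_append, List.length_cons, List.length_nil, length_natBin _ hp] at hj ⊢
      match j with
      | 0 =>
        have hb : (('b':Char) == '1') = false := by decide
        have htb : v.natAbs.testBit (0 + 1 + v.natAbs.size - 1 - 0) = false := by
          apply Nat.testBit_lt_two_pow
          have := Nat.size_le (m := v.natAbs) (n := v.natAbs.size) |>.mp le_rfl
          calc v.natAbs < 2 ^ v.natAbs.size := this
          _ ≤ 2 ^ (0 + 1 + v.natAbs.size - 1 - 0) := Nat.pow_le_pow_right (by omega) (by omega)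
        simpa [hb] using htb.symm
      | j' + 1 =>
        simp only [List.cons_append, List.getD_cons_succ, List.nil_append]
        rw [natBin_getD _ hp j', if_pos (by omega)]
        have harith : 0 + 1 + v.natAbs.size - 1 - (j' + 1) = v.natAbs.size - 1 - j' := by omega
        rw [harith]
        by_cases hb : v.natAbs.testBit (v.natAbs.size - 1 - j') <;> simp [hb]
    · rw [if_neg hv] at hj ⊢
      rw [List.nil_append, length_natBin _ hp] at hj ⊢
      rw [natBin_getD _ hp j, if_pos hj]
      by_cases hb : v.natAbs.testBit (v.natAbs.size - 1 - j) <;> simp [hb]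

-- setting a cell of a rendered row
lemma set_map_range (f : Nat → Char) (N q : Nat) (_hq : q < N) (c : Char) :
    ((List.range N).map f).set q c
      = (List.range N).map (fun p => if p = q then c else f p) := by
  apply List.ext_getElem (by simp)
  intro i h1 h2
  simp only [List.length_set, List.length_map, List.length_range] at h1 h2
  simp [List.getElem_set, eq_comm]

-- Python row[k] = '#' for an in-range negative k writes cell len+k
lemma pySetD_neg (xs : List Char) (k : Nat) (v : Char) (hk : 0 < k) (hk' : k ≤ xs.length) :
    PySem.List.pySetD xs (-(k : Int)) v = xs.set (xs.length - k) v := by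
  simp only [PySem.List.pySetD, PySem.List.pySet?, PySem.List.pyIdx?]
  rw [if_neg (by omega), if_pos (by omega)]
  simp

-- A: the written cell of digit j — position j+diff, wrapped by +n when negative
def wr (N L j : Nat) : Nat := if L ≤ N + j then N + j - L else 2 * N + j - L

-- A's hit test: some digit among the first t is '1' and lands on cell p
def hitB (s : List Char) (N t p : Nat) : Bool :=
  (List.range t).any (fun j => (s.getD j ' ' == '1') && (wr N s.length j == p))

-- A's write loop, cell by cell
lemma foldA (s : List Char) (N : Nat)
    (hbound : ∀ j < s.length, (s.getD j ' ' == '1') = true → s.length ≤ 2 * N + j) :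
    ∀ t, t ≤ s.length →
    (List.range t).foldl
      (fun lst j => if s.getD j ' ' == '1'
        then PySem.List.pySetD lst ((j : Int) + ((N : Int) - (s.length : Int))) '#' else lst)
      (List.replicate N ' ')
    = (List.range N).map (fun p => if hitB s N t p then '#' else ' ') := by
  intro t
  induction t with
  | zero =>
    intro _
    simp [hitB, List.map_const']
  | succ t ih =>
    intro ht
    rw [List.range_succ, List.foldl_append, ih (by omega), List.foldl_cons, List.foldl_nil]
    by_cases hd : (s.getD t ' ' == '1') = true
    · rw [if_pos hd]
      have hb := hbound t (by omega) hd
      have hwr : wr N s.length t < N := by unfold wr; split <;> omega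
      have hlen : ((List.range N).map (fun p => if hitB s N t p then '#' else ' ')).length = N := by
        simp
      have hset : PySem.List.pySetD
            ((List.range N).map (fun p => if hitB s N t p then '#' else ' '))
            ((t : Int) + ((N : Int) - (s.length : Int))) '#'
          = ((List.range N).map (fun p => if hitB s N t p then '#' else ' ')).set (wr N s.length t) '#' := by
        by_cases hcase : s.length ≤ N + t
        · have hidx : ((t : Int) + ((N : Int) - (s.length : Int))) = ((N + t - s.length : Nat) : Int) := by
            omega
          rw [hidx, PySem.List.pySetD_natCast]
          unfold wr
          rw [if_pos hcase]
        · have hidx : ((t : Int) + ((N : Int) - (s.length : Int)))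
              = -(((s.length - N - t : Nat) : Int)) := by omega
          rw [hidx, pySetD_neg _ _ _ (by omega) (by rw [hlen]; omega), hlen]
          unfold wr
          rw [if_neg hcase]
          congr 1
          omega
      rw [hset, set_map_range _ _ _ hwr]
      apply List.map_congr_left
      intro p hp
      rw [List.mem_range] at hp
      have hhit : hitB s N (t + 1) p = (hitB s N t p || (wr N s.length t == p)) := by
        unfold hitB
        rw [List.range_succ, List.any_append]
        simp only [List.getD_eq_getElem?_getD] at hd
        simp [hd]
      rw [hhit]
      by_cases hpw : p = wr N s.length t
      · simp [hpw]
      · have : (wr N s.length t == p) = false := by simp [Ne.symm hpw]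
        simp [this, hpw]
    · rw [if_neg hd]
      apply List.map_congr_left
      intro p hp
      have hhit : hitB s N (t + 1) p = hitB s N t p := by
        unfold hitB
        rw [List.range_succ, List.any_append]
        simp only [Bool.not_eq_true, List.getD_eq_getElem?_getD] at hd
        simp [hd]
      rw [hhit]

-- a cell of A's bitmap is '#' exactly when |v| has a bit landing on it: bit N-1-p or its
-- wrapped partner N+(N-1-p), i.e. a bit of |v| ||| |v| >> N
lemma hit_iff (v : Int) (N : Nat) (hsz : v.natAbs.size ≤ 2 * N) (p : Nat) (hp : p < N) :
    hitB (binTail v) N (binTail v).length p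
      = (v.natAbs ||| v.natAbs >>> N).testBit (N - 1 - p) := by
  have hszL := size_le_len_binTail v
  rw [Bool.eq_iff_iff]
  unfold hitB
  rw [List.any_eq_true]
  simp only [List.mem_range, Nat.testBit_or, Nat.testBit_shiftRight, Bool.or_eq_true]
  constructor
  · rintro ⟨j, hj, hcond⟩
    rw [Bool.and_eq_true] at hcond
    obtain ⟨hdig, hwreq⟩ := hcond
    rw [dig_binTail v j hj] at hdig
    rw [beq_iff_eq] at hwreq
    have hbs : (binTail v).length - 1 - j < v.natAbs.size :=
      Nat.lt_size.mpr (Nat.ge_two_pow_of_testBit hdig)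
    unfold wr at hwreq
    by_cases hc : (binTail v).length ≤ N + j
    · rw [if_pos hc] at hwreq
      left
      have harith : N - 1 - p = (binTail v).length - 1 - j := by omega
      rwa [harith]
    · rw [if_neg hc] at hwreq
      right
      have harith : N + (N - 1 - p) = (binTail v).length - 1 - j := by omega
      rwa [harith]
  · rintro (htb | htb)
    · have hbs : N - 1 - p < v.natAbs.size := Nat.lt_size.mpr (Nat.ge_two_pow_of_testBit htb)
      refine ⟨(binTail v).length - 1 - (N - 1 - p), by omega, ?_⟩
      rw [Bool.and_eq_true]
      constructor
      · rw [dig_binTail v _ (by omega)]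
        have harith : (binTail v).length - 1 - ((binTail v).length - 1 - (N - 1 - p))
            = N - 1 - p := by omega
        rwa [harith]
      · unfold wr
        rw [if_pos (by omega), beq_iff_eq]
        omega
    · have hbs : N + (N - 1 - p) < v.natAbs.size := Nat.lt_size.mpr (Nat.ge_two_pow_of_testBit htb)
      refine ⟨(binTail v).length - 1 - (N + (N - 1 - p)), by omega, ?_⟩
      rw [Bool.and_eq_true]
      constructor
      · rw [dig_binTail v _ (by omega)]
        have harith : (binTail v).length - 1 - ((binTail v).length - 1 - (N + (N - 1 - p)))
            = N + (N - 1 - p) := by omega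
        rwa [harith]
      · unfold wr
        rw [if_neg (by omega), beq_iff_eq]
        omega

-- A's per-value bitmap: cell p shows bit N-1-p of |v| ||| |v| >> N
lemma bitmapRow_eq (n : Int) (v : Int) (hn : 1 ≤ n) (hm : v.natAbs < 2 ^ (2 * n.toNat)) :
    bitmapRow n v = (List.range n.toNat).map
      (fun p => if (v.natAbs ||| v.natAbs >>> n.toNat).testBit (n.toNat - 1 - p) then '#' else ' ') := by
  have hsz : v.natAbs.size ≤ 2 * n.toNat := Nat.size_le.mpr hm
  have hnN : ((n.toNat : Int)) = n := Int.toNat_of_nonneg (by omega)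
  show (PySem.List.pyRange 0 ((binTail v).length : Int) 1).foldl
      (fun lst j => if PySem.List.pyGetD (binTail v) j ' ' == '1'
        then PySem.List.pySetD lst (j + ((n : Int) - ((binTail v).length : Int))) '#' else lst)
      (PySem.List.pyRepeat [' '] n) = _
  rw [PySem.List.pyRange_zero_natCast, List.foldl_map, PySem.List.pyRepeat_singleton, ← hnN]
  simp only [Int.toNat_natCast]
  have hfun : (fun (lst : List Char) (j : Nat) =>
        if PySem.List.pyGetD (binTail v) (↑j) ' ' == '1'
        then PySem.List.pySetD lst (↑j + (((n.toNat : Int)) - ((binTail v).length : Int))) '#'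
        else lst)
      = (fun (lst : List Char) (j : Nat) =>
        if (binTail v).getD j ' ' == '1'
        then PySem.List.pySetD lst ((j : Int) + (((n.toNat : Nat) : Int) - ((binTail v).length : Int))) '#'
        else lst) := by
    funext lst j
    rw [PySem.List.pyGetD_natCast]
  rw [hfun]
  have hbound : ∀ j < (binTail v).length,
      ((binTail v).getD j ' ' == '1') = true → (binTail v).length ≤ 2 * n.toNat + j := by
    intro j hj hdig
    rw [dig_binTail v j hj] at hdig
    have := Nat.lt_size.mpr (Nat.ge_two_pow_of_testBit hdig)
    omega
  rw [foldA (binTail v) n.toNat hbound (binTail v).length le_rfl]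
  apply List.map_congr_left
  intro p hp
  rw [List.mem_range] at hp
  rw [hit_iff v n.toNat hsz p hp]
  rfl

-- wrapping commutes with OR-ing the two values first
lemma or_wrap_comm (a b N r : Nat) :
    ((a ||| b) ||| (a ||| b) >>> N).testBit r
      = ((a ||| a >>> N).testBit r || (b ||| b >>> N).testBit r) := by
  simp only [Nat.testBit_or, Nat.testBit_shiftRight]
  cases a.testBit r <;> cases b.testBit r <;>
    cases a.testBit (N + r) <;> cases b.testBit (N + r) <;> rfl

-- A's string loop: both branches append one character, so the loop is a map
lemma foldl_if_append_eq_map {α : Type} (q : α → Bool) (l : List α) :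
    l.foldl (fun s x => if q x then s ++ [' '] else s ++ ['#']) []
      = l.map (fun x => if q x then ' ' else '#') := by
  have hfun : (fun (s : List Char) x => if q x then s ++ [' '] else s ++ ['#'])
      = fun s x => s ++ [if q x then ' ' else '#'] := by
    funext s x
    cases q x <;> rfl
  rw [hfun, PySem.List.foldl_append_singleton_eq_map, List.nil_append]

-- an append-singleton accumulator loop is a map (unification-friendly form)
lemma foldl_append_eq_map' {α β : Type} (f : α → β) (g : List β → α → List β) (l : List α)
    (hg : ∀ acc x, g acc x = acc ++ [f x]) : l.foldl g [] = l.map f := by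
  have hfun : g = fun acc x => acc ++ [f x] := by funext acc x; exact hg acc x
  rw [hfun, PySem.List.foldl_append_singleton_eq_map, List.nil_append]

-- Python's u.bit_length() is Nat.size
lemma bitLength_eq_size (u : Nat) : PySem.Int.bitLength (u : Int) = u.size := by
  induction u using Nat.strong_induction_on with
  | _ u ih =>
    rcases Nat.eq_zero_or_pos u with h0 | hp
    · subst h0
      simp [PySem.Int.bitLength_zero]
    · rw [PySem.Int.bitLength_natCast hp, ih (u / 2) (Nat.div_lt_self (by omega) (by omega)),
        size_div_two u hp]

-- B's bit test: v >> b & 1 == 1 reads bit b (shift amount b.toNat, as in the port)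
lemma cellB (u : Nat) (b : Int) :
    (PySem.Int.band ((u : Int) >>> ((b.toNat : Nat) : Int)) 1 == 1) = u.testBit b.toNat := by
  have hsh : ∀ (k : Nat), ((u : Int) >>> ((k : Nat) : Int)) = ((u >>> k : Nat) : Int) := by
    intro k
    simp [Int.shiftRight_eq, Int.natCast_shiftRight]
  rw [hsh b.toNat,
    show (1 : Int) = ((1 : Nat) : Int) from rfl, PySem.Int.band_natCast, Nat.and_one_is_mod]
  have h2 := Nat.testBit_shiftRight (x := u) (i := b.toNat) (j := 0)
  rw [Nat.add_zero] at h2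
  rw [← h2, Nat.testBit_zero]
  rcases Nat.mod_two_eq_zero_or_one (u >>> b.toNat) with h | h <;> rw [h] <;> simp

-- B: the written cell of bit b — column n-1-b, wrapped by +n when negative
def wrB (N b : Nat) : Nat := if b < N then N - 1 - b else 2 * N - 1 - b

-- B's hit test: some bit among the first t is set and lands on cell p
def hitC (u N t p : Nat) : Bool :=
  (List.range t).any (fun b => u.testBit b && (wrB N b == p))

-- B's plot loop, cell by cell
lemma foldB (u N : Nat) (hbit : ∀ b, u.testBit b = true → b < 2 * N) :
    ∀ t,
    (List.range t).foldl
      (fun row b => if u.testBit b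
        then PySem.List.pySetD row ((N : Int) - 1 - (b : Int)) '#' else row)
      (List.replicate N ' ')
    = (List.range N).map (fun p => if hitC u N t p then '#' else ' ') := by
  intro t
  induction t with
  | zero =>
    simp [hitC, List.map_const']
  | succ t ih =>
    rw [List.range_succ, List.foldl_append, ih, List.foldl_cons, List.foldl_nil]
    by_cases hd : u.testBit t = true
    · rw [if_pos hd]
      have hb := hbit t hd
      have hwr : wrB N t < N := by unfold wrB; split <;> omega
      have hlen : ((List.range N).map (fun p => if hitC u N t p then '#' else ' ')).length = N := by
        simp
      have hset : PySem.List.pySetD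
            ((List.range N).map (fun p => if hitC u N t p then '#' else ' '))
            ((N : Int) - 1 - (t : Int)) '#'
          = ((List.range N).map (fun p => if hitC u N t p then '#' else ' ')).set (wrB N t) '#' := by
        by_cases hcase : t < N
        · have hidx : ((N : Int) - 1 - (t : Int)) = ((N - 1 - t : Nat) : Int) := by omega
          rw [hidx, PySem.List.pySetD_natCast]
          unfold wrB
          rw [if_pos hcase]
        · have hidx : ((N : Int) - 1 - (t : Int)) = -(((t + 1 - N : Nat) : Int)) := by omega
          rw [hidx, pySetD_neg _ _ _ (by omega) (by rw [hlen]; omega), hlen]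
          unfold wrB
          rw [if_neg hcase]
          congr 1
          omega
      rw [hset, set_map_range _ _ _ hwr]
      apply List.map_congr_left
      intro p hp
      rw [List.mem_range] at hp
      have hhit : hitC u N (t + 1) p = (hitC u N t p || (wrB N t == p)) := by
        unfold hitC
        rw [List.range_succ, List.any_append]
        simp [hd]
      rw [hhit]
      by_cases hpw : p = wrB N t
      · simp [hpw]
      · have : (wrB N t == p) = false := by simp [Ne.symm hpw]
        simp [this, hpw]
    · rw [if_neg hd]
      apply List.map_congr_left
      intro p hp
      have hhit : hitC u N (t + 1) p = hitC u N t p := by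
        unfold hitC
        rw [List.range_succ, List.any_append]
        simp only [Bool.not_eq_true] at hd
        simp [hd]
      rw [hhit]

-- a cell of B's row is '#' exactly when u has bit N-1-p or its wrapped partner N+(N-1-p)
lemma hitC_eq (u N : Nat) (hsz : u.size ≤ 2 * N) (p : Nat) (hp : p < N) :
    hitC u N u.size p = (u ||| u >>> N).testBit (N - 1 - p) := by
  rw [Bool.eq_iff_iff]
  unfold hitC
  rw [List.any_eq_true]
  simp only [List.mem_range, Nat.testBit_or, Nat.testBit_shiftRight, Bool.or_eq_true]
  constructor
  · rintro ⟨b, _, hcond⟩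
    rw [Bool.and_eq_true, beq_iff_eq] at hcond
    obtain ⟨hbit, hwreq⟩ := hcond
    unfold wrB at hwreq
    by_cases hc : b < N
    · rw [if_pos hc] at hwreq
      left
      have : N - 1 - p = b := by omega
      rwa [this]
    · rw [if_neg hc] at hwreq
      right
      have hblt : b < u.size := Nat.lt_size.mpr (Nat.ge_two_pow_of_testBit hbit)
      have : N + (N - 1 - p) = b := by omega
      rwa [this]
  · rintro (htb | htb)
    · have hbs : N - 1 - p < u.size := Nat.lt_size.mpr (Nat.ge_two_pow_of_testBit htb)
      refine ⟨N - 1 - p, hbs, ?_⟩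
      rw [Bool.and_eq_true, beq_iff_eq]
      refine ⟨htb, ?_⟩
      unfold wrB
      rw [if_pos (by omega)]
      omega
    · have hbs : N + (N - 1 - p) < u.size := Nat.lt_size.mpr (Nat.ge_two_pow_of_testBit htb)
      refine ⟨N + (N - 1 - p), hbs, ?_⟩
      rw [Bool.and_eq_true, beq_iff_eq]
      refine ⟨htb, ?_⟩
      unfold wrB
      rw [if_neg (by omega)]
      omega


-- B's per-row loop: cell p shows bit n-1-p of u ||| u >> n (u the OR of the magnitudes)
lemma rowB_eq (n : Int) (u : Nat) (hn : 1 ≤ n) (hm : u < 2 ^ (2 * n.toNat)) :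
    (PySem.List.pyRange 0 (PySem.Int.bitLength (u : Int) : Int) 1).foldl
      (fun row b => if PySem.Int.band ((u : Int) >>> b.toNat) 1 == 1
        then PySem.List.pySetD row (n - 1 - b) '#' else row)
      (PySem.List.pyRepeat [' '] n)
    = (List.range n.toNat).map
        (fun p => if (u ||| u >>> n.toNat).testBit (n.toNat - 1 - p) then '#' else ' ') := by
  have hsz : u.size ≤ 2 * n.toNat := Nat.size_le.mpr hm
  have hnN : ((n.toNat : Int)) = n := Int.toNat_of_nonneg (by omega)
  rw [bitLength_eq_size, PySem.List.pyRange_zero_natCast, List.foldl_map,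
    PySem.List.pyRepeat_singleton, ← hnN]
  simp only [cellB]
  simp only [Int.toNat_natCast]
  refine (foldB u n.toNat (fun b hbset => by
    have := Nat.lt_size.mpr (Nat.ge_two_pow_of_testBit hbset)
    omega) u.size).trans ?_
  apply List.map_congr_left
  intro p hp
  rw [List.mem_range] at hp
  rw [hitC_eq u n.toNat hsz p hp]
  rfl

-- ===== VERDICT (by name: the statement is the Claim_ definition above) =====
theorem solution_spec : Claim_equal_solution := by
  intro n arr1 arr2 _ hpre
  obtain ⟨_, _, hvals⟩ := hpre
  unfold Spec_solution
  by_cases hn : n ≤ 0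
  · rw [solution, solution_alt, PySem.List.pyRange_one_eq_nil hn]
    rfl
  · have hn1 : (1:Int) ≤ n := by omega
    have hnN : ((n.toNat : Int)) = n := Int.toNat_of_nonneg (by omega)
    have hN1 : 1 ≤ n.toNat := by omega
    rw [solution, solution_alt, ← hnN, PySem.List.pyRange_zero_natCast]
    rw [List.foldl_map, List.foldl_map]
    rw [foldl_append_eq_map' _ _ _ (fun acc x => rfl),
        foldl_append_eq_map' _ _ _ (fun acc x => rfl)]
    apply List.map_congr_left
    intro k hk
    rw [List.mem_range] at hk
    rw [PySem.List.pyGetD_natCast arr1 k 0, PySem.List.pyGetD_natCast arr2 k 0]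
    obtain ⟨ha, hb⟩ := hvals k hk
    set v1 := arr1.getD k 0 with hv1
    set v2 := arr2.getD k 0 with hv2
    have hn1' : (1:Int) ≤ (n.toNat : Int) := by omega
    have hnn : ((n.toNat : Int)).toNat = n.toNat := by omega
    -- the A row: the two per-value bitmaps, rendered cell by cell
    rw [bitmapRow_eq _ _ hn1' (by rwa [hnn]), bitmapRow_eq _ _ hn1' (by rwa [hnn])]
    rw [List.foldl_map, foldl_if_append_eq_map]
    -- the B row: u = |v1| | |v2| plotted bit by bit
    set N := n.toNat with hNdef
    set u := v1.natAbs ||| v2.natAbs with hu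
    have hborN : PySem.Int.bor |v1| |v2| = ((u : Nat) : Int) := by
      rw [Int.abs_eq_natAbs, Int.abs_eq_natAbs, PySem.Int.bor_natCast]
    have hult : u < 2 ^ (2 * N) := Nat.or_lt_two_pow ha hb
    have husz : u.size ≤ 2 * N := Nat.size_le.mpr hult
    rw [hborN]
    rw [rowB_eq ((N : Nat) : Int) u hn1' (by rwa [hnn]), hnn]
    congr 1
    apply List.map_congr_left
    intro j hj
    rw [List.mem_range] at hj
    rw [hu, or_wrap_comm]
    cases h1 : (v1.natAbs ||| v1.natAbs >>> N).testBit (N - 1 - j) <;>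
      cases h2 : (v2.natAbs ||| v2.natAbs >>> N).testBit (N - 1 - j) <;>
      simp only [Nat.testBit_or, Nat.testBit_shiftRight, Bool.or_eq_false_iff,
        Bool.or_eq_true] at h1 h2 <;>
      simp [PySem.List.pyGetD_natCast, hj, h1, h2]
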